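-- pv_equiv track=rewrite | github.com/Kyrylo-Ktl/hangman-bot | src/telegram/keyboards.py | get_adaptive_size
-- ===== SOURCE A (Python) =====
-- def get_adaptive_size(n_items: int, min_size: int, max_size: int) -> int:
--     best_size = max_size
--     for size in range(max_size, min_size - 1, -1):
--         if not n_items % size:
--             best_size = size
--             break
--         if n_items % best_size < n_items % size:
--             best_size = size
--     return best_size
-- ===== SOURCE B (Python) =====
-- def get_adaptive_size(n_items: int, min_size: int, max_size: int) -> int:
--     sizes = range(max_size, min_size - 1, -1)
--     for size in sizes:
--         if n_items % size == 0:
--             return size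
--     return max(sizes, key=lambda size: n_items % size, default=max_size)
-- ===== Notes on version B (the rewrite author's own statement) =====
-- stated objective: simpler
-- what changed: A's single interleaved loop (break on exact divisor, else track the best remainder) is split into two plain passes over the same downward range: first return the first exact divisor, otherwise return max(range, key=remainder, default=max_size).
import Mathlib
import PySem

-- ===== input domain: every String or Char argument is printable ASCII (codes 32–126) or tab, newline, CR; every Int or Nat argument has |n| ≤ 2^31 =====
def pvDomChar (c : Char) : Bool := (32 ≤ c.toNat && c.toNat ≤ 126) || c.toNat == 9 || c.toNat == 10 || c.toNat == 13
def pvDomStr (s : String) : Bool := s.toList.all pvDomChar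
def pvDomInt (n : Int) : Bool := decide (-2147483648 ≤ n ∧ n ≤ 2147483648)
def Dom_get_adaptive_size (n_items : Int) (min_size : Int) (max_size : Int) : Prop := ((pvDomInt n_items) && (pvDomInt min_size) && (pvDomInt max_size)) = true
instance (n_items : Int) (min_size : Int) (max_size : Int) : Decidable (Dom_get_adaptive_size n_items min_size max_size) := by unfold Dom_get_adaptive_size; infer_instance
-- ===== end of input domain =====

-- B replaces A's single interleaved loop by two plain passes over the same downward
-- range: first exact divisor, else max by remainder (objective: simpler).

-- ===== PORT A =====
-- A's 'for size in range(max_size, min_size-1, -1)' loop, sizes generated lazily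
-- (as Python's range does); 'stop' is min_size - 1, the break is an early return.
def pvLoopA (n : Int) (stop : Int) (size : Int) (best : Int) : Int :=
  if _h : size ≤ stop then best
  else if PySem.Int.mod n size = 0 then size
  else if PySem.Int.mod n best < PySem.Int.mod n size then
    pvLoopA n stop (size - 1) size
  else
    pvLoopA n stop (size - 1) best
termination_by (size - stop).toNat
decreasing_by all_goals omega

def get_adaptive_size (n_items : Int) (min_size : Int) (max_size : Int) : Int :=
  pvLoopA n_items (min_size - 1) max_size max_size

-- ===== PORT B =====
-- B's first pass: the first size in the downward range with n_items % size == 0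
def pvFirstDiv (n : Int) (stop : Int) (size : Int) : Option Int :=
  if _h : size ≤ stop then none
  else if PySem.Int.mod n size = 0 then some size
  else pvFirstDiv n stop (size - 1)
termination_by (size - stop).toNat
decreasing_by omega

-- B's second pass: Python's max(…, key=…) fold, keeping the first maximal element
def pvMaxByRem (n : Int) (stop : Int) (size : Int) (best : Int) : Int :=
  if _h : size ≤ stop then best
  else if PySem.Int.mod n best < PySem.Int.mod n size then
    pvMaxByRem n stop (size - 1) size
  else
    pvMaxByRem n stop (size - 1) best
termination_by (size - stop).toNat
decreasing_by all_goals omega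

def get_adaptive_size_alt (n_items : Int) (min_size : Int) (max_size : Int) : Int :=
  match pvFirstDiv n_items (min_size - 1) max_size with
  | some s => s
  | none =>
    if max_size ≤ min_size - 1 then max_size   -- max(…, default=max_size) on the empty range
    else pvMaxByRem n_items (min_size - 1) (max_size - 1) max_size

-- ===== PRECONDITION & SPEC =====
-- Pre_ excludes exactly the inputs where Python A raises ZeroDivisionError:
-- size 0 is reached by the loop (max_size = 0 and the range extends down past it).
def Pre_get_adaptive_size (n_items : Int) (min_size : Int) (max_size : Int) : Prop :=
  ¬ (max_size = 0 ∧ min_size ≤ 0)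
instance (n_items : Int) (min_size : Int) (max_size : Int) : Decidable (Pre_get_adaptive_size n_items min_size max_size) := by unfold Pre_get_adaptive_size; infer_instance
def pvWitness_get_adaptive_size : Int × Int × Int := (10, 3, 6)
def Spec_get_adaptive_size (n_items : Int) (min_size : Int) (max_size : Int) (out : Int) : Prop := out = get_adaptive_size_alt n_items min_size max_size
instance (n_items : Int) (min_size : Int) (max_size : Int) (out : Int) : Decidable (Spec_get_adaptive_size n_items min_size max_size out) := by unfold Spec_get_adaptive_size; infer_instance

-- ===== CLAIM (what is proved, stated in full; the proofs are below) =====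
def Claim_equal_get_adaptive_size : Prop := ∀ (n_items : Int) (min_size : Int) (max_size : Int), Dom_get_adaptive_size n_items min_size max_size → Pre_get_adaptive_size n_items min_size max_size → Spec_get_adaptive_size n_items min_size max_size (get_adaptive_size n_items min_size max_size)

-- ===== LEMMAS AND PROOFS =====

-- A's loop equals B's two passes, for any stop, size and running best
theorem pvLoopA_eq (n stop : Int) : ∀ (size best : Int),
    pvLoopA n stop size best =
      (match pvFirstDiv n stop size with
       | some s => s
       | none => pvMaxByRem n stop size best) := by
  intro size
  induction h : (size - stop).toNat using Nat.strong_induction_on generalizing size with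
  | _ k ih =>
    intro best
    rw [pvLoopA, pvFirstDiv, pvMaxByRem]
    by_cases hle : size ≤ stop
    · simp [hle]
    · by_cases hd : PySem.Int.mod n size = 0
      · simp [hle, hd]
      · have hrec := fun best => ih ((size - 1) - stop).toNat (by omega) (size - 1) rfl best
        by_cases h2 : PySem.Int.mod n best < PySem.Int.mod n size <;>
          simp [hle, hd, h2, hrec]

-- ===== VERDICT (by name: the statement is the Claim_ definition above) =====
theorem get_adaptive_size_spec : Claim_equal_get_adaptive_size := by
  intro n m M _ _
  unfold Spec_get_adaptive_size get_adaptive_size get_adaptive_size_alt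
  rw [pvLoopA_eq]
  cases hfd : pvFirstDiv n (m - 1) M with
  | some s => simp
  | none =>
    simp only
    by_cases hle : M ≤ m - 1
    · -- empty range: the loop state is the initial max_size on both sides
      rw [pvMaxByRem]
      simp [hle]
    · -- nonempty range: the first iteration compares M with itself and keeps it
      rw [pvMaxByRem]
      simp [hle]
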